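-- pv_equiv track=rewrite | github.com/vaibhav23283/dataclean-openenv | inference.py | col_has_mixed_dates
-- ===== SOURCE A (Python) =====
-- def col_has_mixed_dates(data: list, col: str) -> bool:
--     """Check if date column has inconsistent formats."""
--     try:
--         dates = [str(row.get(col, "")) for row in data if row.get(col)]
--         formats = set()
--         for d in dates:
--             if "/" in d:
--                 formats.add("slash")
--             elif "-" in d:
--                 formats.add("dash")
--             elif any(m in d for m in ["Jan","Feb","Mar","Apr","May","Jun",
--                                        "Jul","Aug","Sep","Oct","Nov","Dec"]):
--                 formats.add("written")
--         return len(formats) > 1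
--     except Exception:
--         return False
-- ===== SOURCE B (Python) =====
-- def col_has_mixed_dates(data: list, col: str) -> bool:
--     """Check if date column has inconsistent formats."""
--     try:
--         dates = [str(row.get(col, "")) for row in data if row.get(col)]
--         months = ["Jan","Feb","Mar","Apr","May","Jun",
--                   "Jul","Aug","Sep","Oct","Nov","Dec"]
--         has_slash = any("/" in d for d in dates)
--         has_dash = any("-" in d and "/" not in d for d in dates)
--         has_written = any("/" not in d and "-" not in d
--                           and any(m in d for m in months) for d in dates)
--         return (has_slash + has_dash + has_written) > 1
--     except Exception:
--         return False
-- ===== Notes on version B (the rewrite author's own statement) =====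
-- stated objective: alternative
-- what changed: Replaced the loop that accumulates a set of format labels with three independent any()-scans computing presence booleans (slash / dash-without-slash / written-month-only) and a boolean sum compared with 1.
import Mathlib
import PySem

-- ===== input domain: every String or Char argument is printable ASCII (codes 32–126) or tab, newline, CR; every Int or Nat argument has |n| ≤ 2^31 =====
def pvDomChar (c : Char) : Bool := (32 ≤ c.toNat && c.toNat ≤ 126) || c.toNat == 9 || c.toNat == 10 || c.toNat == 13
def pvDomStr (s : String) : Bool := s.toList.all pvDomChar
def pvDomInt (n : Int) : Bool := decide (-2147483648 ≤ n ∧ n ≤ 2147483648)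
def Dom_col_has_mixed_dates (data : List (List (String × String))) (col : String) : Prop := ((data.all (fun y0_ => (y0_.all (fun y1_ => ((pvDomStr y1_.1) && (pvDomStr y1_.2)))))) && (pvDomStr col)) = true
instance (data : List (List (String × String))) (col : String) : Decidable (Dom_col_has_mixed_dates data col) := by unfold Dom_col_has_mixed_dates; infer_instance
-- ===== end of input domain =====

-- B replaces A's label-set-building loop by three independent any()-scans and a boolean sum; alternative decomposition, same cost.

-- ===== PORT A =====
def pvMonthsA : List String := ["Jan","Feb","Mar","Apr","May","Jun","Jul","Aug","Sep","Oct","Nov","Dec"]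

-- the comprehension: [str(row.get(col, "")) for row in data if row.get(col)]  (values are strings, str() is identity)
def pvDatesA (data : List (List (String × String))) (col : String) : List String :=
  (data.filter (fun row => !((PySem.Dict.getD (PySem.Dict.mk row) col "") == ""))).map
    (fun row => PySem.Dict.getD (PySem.Dict.mk row) col "")

-- the 'for d in dates' loop accumulating the set 'formats'
def pvFmtLoop (dates : List String) (s : PySem.Set String) : PySem.Set String :=
  match dates with
  | [] => s
  | d :: rest =>
      pvFmtLoop rest
        (if PySem.Str.isIn "/" d then PySem.Set.add s "slash"
         else if PySem.Str.isIn "-" d then PySem.Set.add s "dash"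
         else if pvMonthsA.any (fun m => PySem.Str.isIn m d) then PySem.Set.add s "written"
         else s)

def col_has_mixed_dates (data : List (List (String × String))) (col : String) : Bool :=
  decide (PySem.Set.len (pvFmtLoop (pvDatesA data col) PySem.Set.empty) > 1)

-- ===== PORT B =====
def pvMonthsB : List String := ["Jan","Feb","Mar","Apr","May","Jun","Jul","Aug","Sep","Oct","Nov","Dec"]

def pvDatesB (data : List (List (String × String))) (col : String) : List String :=
  (data.filter (fun row => !((PySem.Dict.getD (PySem.Dict.mk row) col "") == ""))).map
    (fun row => PySem.Dict.getD (PySem.Dict.mk row) col "")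

def col_has_mixed_dates_alt (data : List (List (String × String))) (col : String) : Bool :=
  let dates := pvDatesB data col
  let hasSlash := dates.any (fun d => PySem.Str.isIn "/" d)
  let hasDash := dates.any (fun d => PySem.Str.isIn "-" d && !PySem.Str.isIn "/" d)
  let hasWritten := dates.any (fun d => !PySem.Str.isIn "/" d && !PySem.Str.isIn "-" d
                                        && pvMonthsB.any (fun m => PySem.Str.isIn m d))
  decide (hasSlash.toNat + hasDash.toNat + hasWritten.toNat > 1)

-- ===== PRECONDITION & SPEC =====
def Spec_col_has_mixed_dates (data : List (List (String × String))) (col : String) (out : Bool) : Prop := out = col_has_mixed_dates_alt data col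
instance (data : List (List (String × String))) (col : String) (out : Bool) : Decidable (Spec_col_has_mixed_dates data col out) := by unfold Spec_col_has_mixed_dates; infer_instance

-- ===== CLAIM (what is proved, stated in full; the proofs are below) =====
def Claim_equal_col_has_mixed_dates : Prop := ∀ (data : List (List (String × String))) (col : String), Dom_col_has_mixed_dates data col → Spec_col_has_mixed_dates data col (col_has_mixed_dates data col)

-- ===== LEMMAS AND PROOFS =====

-- the label a single date string triggers in A's loop, as a Finset
def pvLabel (d : String) : Finset String :=
  if PySem.Str.isIn "/" d then {"slash"}
  else if PySem.Str.isIn "-" d then {"dash"}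
  else if pvMonthsA.any (fun m => PySem.Str.isIn m d) then {"written"}
  else ∅

-- the labels triggered by a whole list of dates
def pvTrig (dates : List String) : Finset String :=
  (if dates.any (fun d => PySem.Str.isIn "/" d) then {"slash"} else ∅)
  ∪ (if dates.any (fun d => PySem.Str.isIn "-" d && !PySem.Str.isIn "/" d) then {"dash"} else ∅)
  ∪ (if dates.any (fun d => !PySem.Str.isIn "/" d && !PySem.Str.isIn "-" d
                            && pvMonthsA.any (fun m => PySem.Str.isIn m d)) then {"written"} else ∅)

lemma pvSet_add_toFinset (s : PySem.Set String) (x : String) :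
    (PySem.Set.add s x).toFinset = insert x s.toFinset := by
  unfold PySem.Set.add
  split
  · rename_i h
    have hx : x ∈ s := by simpa [PySem.Set.contains_iff] using h
    exact (Finset.insert_eq_self.mpr (List.mem_toFinset.mpr hx)).symm
  · ext y
    simp [List.toFinset_append]

lemma pvSet_add_nodup (s : PySem.Set String) (x : String) (h : s.Nodup) :
    (PySem.Set.add s x).Nodup := by
  unfold PySem.Set.add
  split
  · exact h
  · rename_i hc
    have hx : x ∉ s := fun hm => hc (by simpa [PySem.Set.contains_iff] using hm)
    rw [List.nodup_append]
    refine ⟨h, by simp, ?_⟩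
    intro a ha b hb hab
    have hbx : b = x := by simpa using hb
    exact hx (hbx ▸ hab ▸ ha)

lemma pvFmtLoop_nodup (dates : List String) (s : PySem.Set String) (h : s.Nodup) :
    (pvFmtLoop dates s).Nodup := by
  induction dates generalizing s with
  | nil => simpa [pvFmtLoop] using h
  | cons d rest ih =>
      simp only [pvFmtLoop]
      split_ifs <;> exact ih _ (by first | exact pvSet_add_nodup _ _ h | exact h)

set_option maxHeartbeats 1000000 in
lemma pvTrig_cons (d : String) (rest : List String) :
    pvTrig (d :: rest) = pvLabel d ∪ pvTrig rest := by
  unfold pvTrig pvLabel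
  by_cases h1 : PySem.Str.isIn "/" d <;>
  by_cases h2 : PySem.Str.isIn "-" d <;>
  by_cases h3 : pvMonthsA.any (fun m => PySem.Str.isIn m d) <;>
    simp only [List.any_cons, h1, h2, h3, Bool.true_or, Bool.false_or, Bool.not_true,
      Bool.not_false, Bool.and_true, Bool.and_false,
      if_true, if_false, Bool.false_eq_true] <;>
    · ext x
      split_ifs <;> simp <;> tauto

lemma pvFmtLoop_toFinset (dates : List String) (s : PySem.Set String) :
    (pvFmtLoop dates s).toFinset = s.toFinset ∪ pvTrig dates := by
  induction dates generalizing s with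
  | nil => simp [pvFmtLoop, pvTrig]
  | cons d rest ih =>
      simp only [pvFmtLoop]
      rw [ih, pvTrig_cons]
      have hb : (if PySem.Str.isIn "/" d then PySem.Set.add s "slash"
                 else if PySem.Str.isIn "-" d then PySem.Set.add s "dash"
                 else if pvMonthsA.any (fun m => PySem.Str.isIn m d) then PySem.Set.add s "written"
                 else s).toFinset = s.toFinset ∪ pvLabel d := by
        unfold pvLabel
        split_ifs <;>
          first
            | rw [pvSet_add_toFinset, Finset.insert_eq, Finset.union_comm]
            | simp
      rw [hb, Finset.union_assoc]

set_option maxHeartbeats 1000000 in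
lemma col_has_mixed_dates_eq_alt (data : List (List (String × String))) (col : String) :
    col_has_mixed_dates data col = col_has_mixed_dates_alt data col := by
  unfold col_has_mixed_dates col_has_mixed_dates_alt
  rw [show pvDatesB data col = pvDatesA data col from rfl]
  generalize pvDatesA data col = dates
  have hnd : (pvFmtLoop dates PySem.Set.empty).Nodup :=
    pvFmtLoop_nodup _ _ (by simp [PySem.Set.empty])
  have hfin : (pvFmtLoop dates PySem.Set.empty).toFinset = pvTrig dates := by
    rw [pvFmtLoop_toFinset]
    simp [PySem.Set.empty]
  have hlen : PySem.Set.len (pvFmtLoop dates PySem.Set.empty) = ((pvTrig dates).card : Int) := by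
    unfold PySem.Set.len
    rw [← List.toFinset_card_of_nodup hnd, hfin]
  rw [hlen]
  have hmon : pvMonthsB = pvMonthsA := rfl
  simp only [hmon]
  by_cases h1 : dates.any (fun d => PySem.Str.isIn "/" d) <;>
  by_cases h2 : dates.any (fun d => PySem.Str.isIn "-" d && !PySem.Str.isIn "/" d) <;>
  by_cases h3 : dates.any (fun d => !PySem.Str.isIn "/" d && !PySem.Str.isIn "-" d
                            && pvMonthsA.any (fun m => PySem.Str.isIn m d)) <;>
    simp only [pvTrig, h1, h2, h3, Bool.false_eq_true, if_true, if_false] <;>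
    simp [Bool.toNat]

-- ===== VERDICT (by name: the statement is the Claim_ definition above) =====
theorem col_has_mixed_dates_spec : Claim_equal_col_has_mixed_dates := by
  intro data col _
  unfold Spec_col_has_mixed_dates
  exact col_has_mixed_dates_eq_alt data col
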